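-- pv_equiv track=rewrite | github.com/Lurkki14/omorfi | docs/generate-lexemes.py | filenamify
-- ===== SOURCE A (Python) =====
-- def filenamify(s):
--     repls = {'!': 'EXCL', '?': 'QQ', '"': 'DQUO', "'": 'SQUO', '/': 'SLASH',
--              '\\': 'BACKSLASH', '<': 'LEFT', '>': 'RIGHT', ':': 'COLON',
--              ' ': 'SPACE', '|': 'PIPE', '.': 'STOP', ',': 'COMMA',
--              ';': 'SC', '(': 'LBR', ')': 'RBR', '[': 'LSQ',
--              ']': 'RSQ', '{': 'LCURL', '}': 'RCURL', '$': 'DORA',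
--              '\t': 'TAB'}
--     for needl, subst in repls.items():
--         s = s.replace(needl, subst)
--     return s
-- ===== SOURCE B (Python) =====
-- def filenamify(s):
--     def tok(c):
--         if c == '!': return 'EXCL'
--         if c == '?': return 'QQ'
--         if c == '"': return 'DQUO'
--         if c == "'": return 'SQUO'
--         if c == '/': return 'SLASH'
--         if c == '\\': return 'BACKSLASH'
--         if c == '<': return 'LEFT'
--         if c == '>': return 'RIGHT'
--         if c == ':': return 'COLON'
--         if c == ' ': return 'SPACE'
--         if c == '|': return 'PIPE'
--         if c == '.': return 'STOP'
--         if c == ',': return 'COMMA'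
--         if c == ';': return 'SC'
--         if c == '(': return 'LBR'
--         if c == ')': return 'RBR'
--         if c == '[': return 'LSQ'
--         if c == ']': return 'RSQ'
--         if c == '{': return 'LCURL'
--         if c == '}': return 'RCURL'
--         if c == '$': return 'DORA'
--         if c == '\t': return 'TAB'
--         return c
--     return ''.join(tok(c) for c in s)
-- ===== Notes on version B (the rewrite author's own statement) =====
-- stated objective: alternative
-- what changed: A does 22 sequential full-string s.replace passes, one per rule; B makes a single pass over the characters, classifying each with a branch-table helper function (no dict, no replace) and joining the tokens; equivalent because no substitution output contains a needle character.
import Mathlib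
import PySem

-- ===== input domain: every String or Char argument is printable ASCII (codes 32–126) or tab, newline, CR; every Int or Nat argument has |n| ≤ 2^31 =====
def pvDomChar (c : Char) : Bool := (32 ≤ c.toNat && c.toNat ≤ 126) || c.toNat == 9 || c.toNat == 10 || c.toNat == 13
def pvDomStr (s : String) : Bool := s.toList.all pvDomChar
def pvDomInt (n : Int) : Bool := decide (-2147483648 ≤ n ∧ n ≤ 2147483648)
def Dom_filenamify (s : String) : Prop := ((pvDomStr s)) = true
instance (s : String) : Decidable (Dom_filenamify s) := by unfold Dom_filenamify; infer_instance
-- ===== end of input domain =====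

-- B replaces A's 22 sequential full-string replace passes by one pass over the characters with a branch-table classifier; same result.

-- ===== PORT A =====
-- the literal dict of A, in insertion order, as (needle, substitution) string pairs
def filenamifyRepls : List (String × String) :=
  [("!", "EXCL"), ("?", "QQ"), ("\"", "DQUO"), ("'", "SQUO"), ("/", "SLASH"),
   ("\\", "BACKSLASH"), ("<", "LEFT"), (">", "RIGHT"), (":", "COLON"),
   (" ", "SPACE"), ("|", "PIPE"), (".", "STOP"), (",", "COMMA"),
   (";", "SC"), ("(", "LBR"), (")", "RBR"), ("[", "LSQ"),
   ("]", "RSQ"), ("{", "LCURL"), ("}", "RCURL"), ("$", "DORA"),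
   ("\t", "TAB")]

-- A: for needl, subst in repls.items(): s = s.replace(needl, subst)
def filenamify (s : String) : String :=
  filenamifyRepls.foldl (fun acc p => PySem.Str.replace acc p.1 p.2) s

-- ===== PORT B =====
-- B's helper tok(c): an early-return chain of character tests
def filenamifyTok (c : Char) : String :=
  if c = '!' then "EXCL"
  else if c = '?' then "QQ"
  else if c = '"' then "DQUO"
  else if c = '\'' then "SQUO"
  else if c = '/' then "SLASH"
  else if c = '\\' then "BACKSLASH"
  else if c = '<' then "LEFT"
  else if c = '>' then "RIGHT"
  else if c = ':' then "COLON"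
  else if c = ' ' then "SPACE"
  else if c = '|' then "PIPE"
  else if c = '.' then "STOP"
  else if c = ',' then "COMMA"
  else if c = ';' then "SC"
  else if c = '(' then "LBR"
  else if c = ')' then "RBR"
  else if c = '[' then "LSQ"
  else if c = ']' then "RSQ"
  else if c = '{' then "LCURL"
  else if c = '}' then "RCURL"
  else if c = '$' then "DORA"
  else if c = '\t' then "TAB"
  else String.singleton c

-- B: ''.join(tok(c) for c in s)
def filenamify_alt (s : String) : String :=
  PySem.Str.join "" (s.toList.map filenamifyTok)

-- ===== PRECONDITION & SPEC =====
def Spec_filenamify (s : String) (out : String) : Prop := out = filenamify_alt s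
instance (s : String) (out : String) : Decidable (Spec_filenamify s out) := by unfold Spec_filenamify; infer_instance

-- ===== CLAIM (what is proved, stated in full; the proofs are below) =====
def Claim_equal_filenamify : Prop := ∀ (s : String), Dom_filenamify s → Spec_filenamify s (filenamify s)

-- ===== LEMMAS AND PROOFS =====

-- the char-level rule list corresponding to filenamifyRepls
def pvRL : List (List Char × List Char) := filenamifyRepls.map (fun p => (p.1.toList, p.2.toList))

-- the fold at the char level
def pvF (R : List (List Char × List Char)) (l : List Char) : List Char :=
  R.foldl (fun l p => PySem.Chars.replace l p.1 p.2) l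

-- single-char replace is a flatMap (fuel spec of Chars.replace.go)
theorem pv_go_spec (n : Char) (new : List Char) :
    ∀ (fuel : Nat) (l acc : List Char), l.length ≤ fuel →
      PySem.Chars.replace.go [n] new fuel l acc
        = acc.reverse ++ l.flatMap (fun c => if c = n then new else [c]) := by
  intro fuel
  induction fuel with
  | zero =>
    intro l acc h
    have : l = [] := List.eq_nil_of_length_eq_zero (Nat.le_zero.mp h)
    subst this
    simp [PySem.Chars.replace.go]
  | succ f ih =>
    intro l acc h
    cases l with
    | nil => simp [PySem.Chars.replace.go]
    | cons c t =>
      by_cases hc : c = n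
      · subst hc
        have hpre : List.isPrefixOf [c] (c :: t) = true := by
          simp [List.isPrefixOf]
        simp only [PySem.Chars.replace.go, hpre, if_pos]
        rw [show List.drop [c].length (c :: t) = t by simp]
        rw [ih t (new.reverse ++ acc) (by simpa using Nat.le_of_succ_le_succ h)]
        simp
      · have hpre : List.isPrefixOf [n] (c :: t) = false := by
          simp [List.isPrefixOf]
          intro hcn; exact hc hcn.symm
        simp only [PySem.Chars.replace.go, hpre]
        rw [ih t (c :: acc) (by simpa using Nat.le_of_succ_le_succ h)]
        simp [hc]

theorem pv_replace_single (n : Char) (new l : List Char) :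
    PySem.Chars.replace l [n] new = l.flatMap (fun c => if c = n then new else [c]) := by
  unfold PySem.Chars.replace
  simp only [List.isEmpty_cons]
  rw [if_neg (by simp), pv_go_spec n new l.length l [] le_rfl]
  simp

-- the fold distributes: F R l is a flatMap of its action on singletons
theorem pv_F_flatMap (R : List (List Char × List Char))
    (h1 : ∀ r ∈ R, r.1.length = 1) :
    ∀ l, pvF R l = l.flatMap (fun c => pvF R [c]) := by
  induction R with
  | nil => intro l; simp [pvF]
  | cons p R ih =>
    intro l
    obtain ⟨n, hn⟩ : ∃ n, p.1 = [n] := by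
      have := h1 p (by simp)
      cases hp : p.1 with
      | nil => rw [hp] at this; simp at this
      | cons a t =>
        rw [hp] at this
        cases t with
        | nil => exact ⟨a, rfl⟩
        | cons b u => simp at this
    have ih' := ih (fun r hr => h1 r (by simp [hr]))
    have step : ∀ m, pvF (p :: R) m = pvF R (m.flatMap (fun c => if c = n then p.2 else [c])) := by
      intro m; simp [pvF, hn, pv_replace_single]
    rw [step l, ih', List.flatMap_assoc]
    apply List.flatMap_congr
    intro c _
    rw [step [c]]
    simp only [List.flatMap_cons, List.flatMap_nil, List.append_nil]
    rw [ih' (if c = n then p.2 else [c])]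

-- a list none of whose characters is a needle of R is left unchanged by the fold
theorem pv_F_untouched (R : List (List Char × List Char))
    (h1 : ∀ r ∈ R, r.1.length = 1) :
    ∀ l, (∀ c ∈ l, ∀ r ∈ R, [c] ≠ r.1) → pvF R l = l := by
  induction R with
  | nil => intro l _; simp [pvF]
  | cons p R ih =>
    intro l hl
    obtain ⟨n, hn⟩ : ∃ n, p.1 = [n] := by
      have := h1 p (by simp)
      cases hp : p.1 with
      | nil => rw [hp] at this; simp at this
      | cons a t =>
        rw [hp] at this
        cases t with
        | nil => exact ⟨a, rfl⟩
        | cons b u => simp at this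
    have hrepl : l.flatMap (fun c => if c = n then p.2 else [c]) = l := by
      have : ∀ c ∈ l, (if c = n then p.2 else [c]) = [c] := by
        intro c hc
        have := hl c hc p (by simp)
        rw [hn] at this
        rw [if_neg (by intro hcn; exact this (by rw [hcn])) ]
      calc l.flatMap (fun c => if c = n then p.2 else [c])
          = l.flatMap (fun c => [c]) := List.flatMap_congr this
        _ = l := by simp
    simp only [pvF, List.foldl_cons]
    rw [hn, pv_replace_single, hrepl]
    exact ih (fun r hr => h1 r (by simp [hr])) l
      (fun c hc r hr => hl c hc r (by simp [hr]))

-- lookup-with-default on the char-level rule list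
def pvLu (R : List (List Char × List Char)) (c : Char) : List Char :=
  match R with
  | [] => [c]
  | p :: R => if [c] = p.1 then p.2 else pvLu R c

-- per-character value of the fold, when no substitution reintroduces a needle
theorem pv_F_singleton (R : List (List Char × List Char))
    (h1 : ∀ r ∈ R, r.1.length = 1)
    (h2 : ∀ r ∈ R, ∀ c ∈ r.2, ∀ r' ∈ R, [c] ≠ r'.1) :
    ∀ c, pvF R [c] = pvLu R c := by
  induction R with
  | nil => intro c; simp [pvF, pvLu]
  | cons p R ih =>
    intro c
    obtain ⟨n, hn⟩ : ∃ n, p.1 = [n] := by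
      have := h1 p (by simp)
      cases hp : p.1 with
      | nil => rw [hp] at this; simp at this
      | cons a t =>
        rw [hp] at this
        cases t with
        | nil => exact ⟨a, rfl⟩
        | cons b u => simp at this
    have h1' : ∀ r ∈ R, r.1.length = 1 := fun r hr => h1 r (by simp [hr])
    have h2' : ∀ r ∈ R, ∀ c ∈ r.2, ∀ r' ∈ R, [c] ≠ r'.1 :=
      fun r hr c hc r' hr' => h2 r (by simp [hr]) c hc r' (by simp [hr'])
    simp only [pvF, List.foldl_cons]
    rw [hn, pv_replace_single]
    by_cases hc : c = n
    · rw [show [c].flatMap (fun c' => if c' = n then p.2 else [c']) = p.2 by simp [hc]]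
      have huntouched : pvF R p.2 = p.2 :=
        pv_F_untouched R h1' p.2
          (fun c' hc' r' hr' => h2 p (by simp) c' hc' r' (by simp [hr']))
      rw [show (R.foldl (fun l q => PySem.Chars.replace l q.1 q.2) p.2) = pvF R p.2 from rfl,
        huntouched]
      have hcn : [c] = p.1 := by rw [hn, hc]
      simp [pvLu, hcn]
    · rw [show [c].flatMap (fun c' => if c' = n then p.2 else [c']) = [c] by simp [hc]]
      rw [show (R.foldl (fun l q => PySem.Chars.replace l q.1 q.2) [c]) = pvF R [c] from rfl,
        ih h1' h2']
      have hcn : ([c] ≠ p.1) := by rw [hn]; intro h; exact hc (by injection h)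
      simp [pvLu, hcn]

-- one step of the rule-list lookup for a single-character needle
theorem pv_lu_cons (n : Char) (v : List Char) (R : List (List Char × List Char)) (c : Char) :
    pvLu (([n], v) :: R) c = if c = n then v else pvLu R c := by
  simp [pvLu, List.cons.injEq]

-- pvRL written out with char-list needles (definitionally equal)
def pvRL2 : List (List Char × List Char) :=
  [(['!'], "EXCL".toList), (['?'], "QQ".toList), (['"'], "DQUO".toList),
   (['\''], "SQUO".toList), (['/'], "SLASH".toList), (['\\'], "BACKSLASH".toList),
   (['<'], "LEFT".toList), (['>'], "RIGHT".toList), ([':'], "COLON".toList),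
   ([' '], "SPACE".toList), (['|'], "PIPE".toList), (['.'], "STOP".toList),
   ([','], "COMMA".toList), ([';'], "SC".toList), (['('], "LBR".toList),
   ([')'], "RBR".toList), (['['], "LSQ".toList), ([']'], "RSQ".toList),
   (['{'], "LCURL".toList), (['}'], "RCURL".toList), (['$'], "DORA".toList),
   (['\t'], "TAB".toList)]

theorem pv_RL_eq : pvRL = pvRL2 := by decide

-- the rule-list lookup computes exactly B's branch-table classifier
set_option maxHeartbeats 1000000 in
theorem pv_lu_eq_tok (c : Char) : pvLu pvRL c = (filenamifyTok c).toList := by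
  rw [pv_RL_eq]
  simp only [pvRL2, pv_lu_cons, pvLu, filenamifyTok, apply_ite String.toList]
  simp [String.singleton]

-- A's fold at the string level unfolds to the char-level fold
theorem pv_toList_fold :
    ∀ (R : List (String × String)) (s : String),
      (R.foldl (fun acc p => PySem.Str.replace acc p.1 p.2) s).toList
        = pvF (R.map (fun p => (p.1.toList, p.2.toList))) s.toList := by
  intro R
  induction R with
  | nil => intro s; simp [pvF]
  | cons p R ih =>
    intro s
    simp only [List.foldl_cons, List.map_cons, pvF] at *
    rw [ih, PySem.Str.toList_replace]

-- join with empty separator is flatten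
theorem pv_join_nil (parts : List (List Char)) :
    PySem.Chars.join [] parts = parts.flatten := by
  unfold PySem.Chars.join
  induction parts with
  | nil => simp [List.intercalate]
  | cons p ps ih =>
    cases ps with
    | nil => simp [List.intercalate]
    | cons q qs =>
      simp only [List.intercalate] at *
      simp [List.intersperse] at *
      simpa using ih

-- the concrete table satisfies the lemmas' hypotheses (kernel-checked on the literal)
theorem pv_h1b : (pvRL.all (fun r => decide (r.1.length = 1))) = true := by rfl

theorem pv_h2b :
    (pvRL.all (fun r => r.2.all (fun c => pvRL.all (fun r2 => decide ([c] ≠ r2.1))))) = true := by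
  rfl

-- ===== VERDICT (by name: the statement is the Claim_ definition above) =====

set_option maxHeartbeats 400000 in
theorem filenamify_spec : Claim_equal_filenamify := by
  intro s _
  unfold Spec_filenamify
  rw [← String.toList_inj]
  rw [show filenamify s = filenamifyRepls.foldl (fun acc p => PySem.Str.replace acc p.1 p.2) s from rfl,
      pv_toList_fold, show (filenamifyRepls.map (fun p => (p.1.toList, p.2.toList))) = pvRL from rfl]
  have h1 : ∀ r ∈ pvRL, r.1.length = 1 := by
    have := pv_h1b; simp only [List.all_eq_true, decide_eq_true_eq] at this; exact this
  rw [pv_F_flatMap pvRL h1 s.toList]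
  unfold filenamify_alt
  rw [PySem.Str.toList_join]
  simp only [String.toList_empty]
  rw [pv_join_nil, List.map_map, List.flatMap]
  have h2 : ∀ r ∈ pvRL, ∀ c ∈ r.2, ∀ r' ∈ pvRL, [c] ≠ r'.1 := by
    have := pv_h2b; simp only [List.all_eq_true, decide_eq_true_eq] at this; exact this
  exact congrArg List.flatten (List.map_congr_left (fun c _ => by
    rw [pv_F_singleton pvRL h1 h2 c, pv_lu_eq_tok]; rfl))
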